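-- pv_equiv track=rewrite | github.com/LibenHailu/interview-prep | codeforce_personal/div 3/B. Remove Prefix.py | solution
-- ===== SOURCE A (Python) =====
-- from collections import deque
--
-- def solution(nums):
--     # add them in a queue
--     # first check len queue with the len of its set
--     # len(set) == len(queue) ans 0
--     # popleft form que add your steps and do the checks
--
--     queue = deque(nums)
--     hashSet = set(nums)
--
--     if len(queue) == len(hashSet):
--         return 0
--
--     res = 0
--     while queue:
--         queue.popleft()
--         res += 1
--         if len(queue) == len(set(queue)):
--             return res
--
--     return res
-- ===== SOURCE B (Python) =====
-- def solution(nums):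
--     seen = set()
--     for i in range(len(nums) - 1, -1, -1):
--         if nums[i] in seen:
--             return i + 1
--         seen.add(nums[i])
--     return 0
-- ===== Notes on version B (the rewrite author's own statement) =====
-- stated objective: faster
-- what changed: Single right-to-left scan with a growing set that stops at the first duplicate, replacing A's loop that rebuilds set(queue) after every popleft.
import Mathlib
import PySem

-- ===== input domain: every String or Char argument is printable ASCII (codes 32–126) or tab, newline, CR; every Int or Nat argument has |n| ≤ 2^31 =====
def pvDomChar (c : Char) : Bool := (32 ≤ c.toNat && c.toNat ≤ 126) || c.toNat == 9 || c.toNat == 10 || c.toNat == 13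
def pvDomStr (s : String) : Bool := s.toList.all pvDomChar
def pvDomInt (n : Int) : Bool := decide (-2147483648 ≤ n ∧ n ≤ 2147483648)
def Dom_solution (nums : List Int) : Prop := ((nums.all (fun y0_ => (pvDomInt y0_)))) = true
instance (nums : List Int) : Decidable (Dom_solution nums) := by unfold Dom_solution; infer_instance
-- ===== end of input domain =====

-- B replaces A's pop-and-rebuild-set loop with one right-to-left scan keeping a
-- growing set, stopping at the first duplicate (objective: faster).


-- ===== PORT A =====
-- the while loop: popleft, res += 1, return res if len(queue) == len(set(queue))
def solutionLoop : List Int → Int → Int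
  | [], res => res
  | _ :: t, res =>
    if t.length = (PySem.Set.ofList t).length then res + 1
    else solutionLoop t (res + 1)

def solution (nums : List Int) : Int :=
  if nums.length = (PySem.Set.ofList nums).length then 0
  else solutionLoop nums 0

-- ===== PORT B =====
-- the for loop over range(len(nums)-1, -1, -1): the list argument holds the
-- elements nums[i], nums[i-1], … in scan order (the reversed prefix);
-- n = i + 1 is the returned value if nums[i] is already in seen.
def solutionAltLoop : List Int → Int → PySem.Set Int → Int
  | [], _, _ => 0
  | x :: rest, n, seen =>
    if PySem.Set.contains seen x then n
    else solutionAltLoop rest (n - 1) (PySem.Set.add seen x)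

def solution_alt (nums : List Int) : Int :=
  solutionAltLoop nums.reverse nums.length PySem.Set.empty

-- ===== PRECONDITION & SPEC =====
def Spec_solution (nums : List Int) (out : Int) : Prop := out = solution_alt nums
instance (nums : List Int) (out : Int) : Decidable (Spec_solution nums out) := by unfold Spec_solution; infer_instance

-- ===== CLAIM (what is proved, stated in full; the proofs are below) =====
def Claim_equal_solution : Prop := ∀ (nums : List Int), Dom_solution nums → Spec_solution nums (solution nums)

-- ===== LEMMAS AND PROOFS =====

-- common characterisation: the least k with (drop k l).Nodup, computed recursively
def minDrop : List Int → Nat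
  | [] => 0
  | x :: t => if (x :: t).Nodup then 0 else 1 + minDrop t

theorem minDrop_of_nodup (l : List Int) (h : l.Nodup) : minDrop l = 0 := by
  cases l with
  | nil => rfl
  | cons x t => simp [minDrop, h]

theorem ofList_sublist (l : List Int) : (PySem.Set.ofList l).Sublist l := by
  induction l with
  | nil => simp [PySem.Set.ofList, PySem.Set.empty]
  | cons x t ih =>
    rw [PySem.Set.ofList_cons]
    exact (List.filter_sublist.trans ih).cons₂ x

theorem nodup_iff_len (l : List Int) :
    l.length = (PySem.Set.ofList l).length ↔ l.Nodup := by
  constructor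
  · intro h
    have := (ofList_sublist l).eq_of_length h.symm
    rw [← this]
    exact PySem.Set.nodup_ofList l
  · intro h
    rw [PySem.Set.ofList_eq_self_of_nodup l h]

theorem solutionLoop_eq (l : List Int) :
    ∀ res : Int, ¬ l.Nodup → solutionLoop l res = res + (minDrop l : Int) := by
  induction l with
  | nil => intro res h; exact absurd List.nodup_nil h
  | cons x t ih =>
    intro res h
    by_cases ht : t.Nodup
    · simp [solutionLoop, (nodup_iff_len t).mpr ht, minDrop, h,
        minDrop_of_nodup t ht]
    · have hlen : ¬ t.length = (PySem.Set.ofList t).length := fun he =>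
        ht ((nodup_iff_len t).mp he)
      simp only [solutionLoop, hlen, if_false]
      rw [ih (res + 1) ht]
      simp only [minDrop, h, if_false]
      push_cast
      ring

-- if the suffix t is already not Nodup, no amount of dropping within l helps
theorem minDrop_append (l t : List Int) (h : ¬ t.Nodup) :
    minDrop (l ++ t) = l.length + minDrop t := by
  induction l with
  | nil => simp
  | cons x l' ih =>
    have hnd : ¬ (x :: (l' ++ t)).Nodup := fun hn =>
      h (hn.sublist (List.sublist_append_right (x :: l') t))
    simp only [List.cons_append, minDrop, hnd, if_false, ih, List.length_cons]
    omega

theorem solutionAltLoop_eq (pre : List Int) :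
    ∀ (s : List Int) (seen : PySem.Set Int), s.Nodup →
    (∀ x, x ∈ seen ↔ x ∈ s) →
    solutionAltLoop pre.reverse pre.length seen = (minDrop (pre ++ s) : Int) := by
  induction pre using List.reverseRecOn with
  | nil =>
    intro s seen hs _
    simp [solutionAltLoop, minDrop_of_nodup s hs]
  | append_singleton pre' a ih =>
    intro s seen hs hmem
    rw [List.reverse_append, List.reverse_singleton, List.singleton_append]
    by_cases hin : a ∈ s
    · have hc : PySem.Set.contains seen a = true := by
        rw [PySem.Set.contains_iff]; exact (hmem a).mpr hin
      have hnd : ¬ (a :: s).Nodup := by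
        simp [List.nodup_cons, hin]
      have hmd : minDrop (pre' ++ a :: s) = pre'.length + 1 := by
        rw [minDrop_append pre' (a :: s) hnd]
        simp [minDrop, hnd, minDrop_of_nodup s hs]
      simp only [solutionAltLoop, hc, if_true, List.append_assoc,
        List.singleton_append, hmd]
      push_cast
      simp
    · have hc : PySem.Set.contains seen a = false := by
        rw [Bool.eq_false_iff]
        intro hcc
        exact hin ((hmem a).mp ((PySem.Set.contains_iff seen a).mp hcc))
      have hmem' : ∀ x, x ∈ PySem.Set.add seen a ↔ x ∈ a :: s := by
        intro x
        rw [PySem.Set.mem_add, hmem x]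
        simp [or_comm, eq_comm]
      have hnd' : (a :: s).Nodup := by
        simp [List.nodup_cons, hin, hs]
      have hlen : ((pre' ++ [a]).length : Int) - 1 = (pre'.length : Int) := by
        simp
      simp only [solutionAltLoop, hc, Bool.false_eq_true, if_false, hlen]
      rw [ih (a :: s) (PySem.Set.add seen a) hnd' hmem', List.append_assoc,
        List.singleton_append]

theorem solution_alt_eq (nums : List Int) : solution_alt nums = (minDrop nums : Int) := by
  have := solutionAltLoop_eq nums [] PySem.Set.empty List.nodup_nil (by simp [PySem.Set.empty])
  simpa [solution_alt] using this

-- ===== VERDICT (by name: the statement is the Claim_ definition above) =====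
theorem solution_spec : Claim_equal_solution := by
  intro nums _
  show solution nums = solution_alt nums
  rw [solution_alt_eq]
  unfold solution
  by_cases h : nums.Nodup
  · simp [(nodup_iff_len nums).mpr h, minDrop_of_nodup nums h]
  · have hlen : ¬ nums.length = (PySem.Set.ofList nums).length := fun he =>
      h ((nodup_iff_len nums).mp he)
    simp [hlen, solutionLoop_eq nums 0 h]
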